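-- pv_equiv track=rewrite | github.com/SDET-SOLOMAN/code_wars_python | kata_7s/cats_and_shelves.py | solution
-- ===== SOURCE A (Python) =====
-- def solution(start, finish):
--     counter = 0
--     cats = start
--
--     while cats != finish:
--         if cats + 3 <= finish:
--             cats += 3
--         elif cats + 1 <= finish:
--             cats += 1
--         counter += 1
--     return counter
-- ===== SOURCE B (Python) =====
-- def solution(start, finish):
--     diff = finish - start
--     return diff // 3 + diff % 3
-- ===== Notes on version B (the rewrite author's own statement) =====
-- stated objective: simpler
-- what changed: Replaces the greedy +3/+1 simulation loop with the closed form diff//3 + diff%3 where diff = finish - start.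
import Mathlib
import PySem

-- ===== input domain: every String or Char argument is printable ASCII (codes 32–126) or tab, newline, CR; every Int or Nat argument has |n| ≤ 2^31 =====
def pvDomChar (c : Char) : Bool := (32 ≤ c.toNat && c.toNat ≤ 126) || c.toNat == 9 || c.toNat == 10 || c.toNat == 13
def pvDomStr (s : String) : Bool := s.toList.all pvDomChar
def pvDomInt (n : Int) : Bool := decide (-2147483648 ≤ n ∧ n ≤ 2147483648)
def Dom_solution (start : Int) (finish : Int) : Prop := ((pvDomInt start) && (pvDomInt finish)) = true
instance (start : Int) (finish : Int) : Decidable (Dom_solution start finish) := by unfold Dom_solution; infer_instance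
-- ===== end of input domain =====

-- B replaces A's greedy +3/+1 simulation loop by the closed form diff//3 + diff%3 (simpler).


-- ===== PORT A =====
-- the while loop; when cats > finish the Python loop never terminates (outside Pre_), the
-- guard returns counter there only to make the recursion total
def solutionLoop (finish : Int) (cats : Int) (counter : Int) : Int :=
  if cats = finish then counter
  else if _h : cats < finish then
    if cats + 3 ≤ finish then solutionLoop finish (cats + 3) (counter + 1)
    else solutionLoop finish (cats + 1) (counter + 1)
  else counter
termination_by (finish - cats).toNat
decreasing_by all_goals omega

def solution (start : Int) (finish : Int) : Int :=
  solutionLoop finish start 0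

-- ===== PORT B =====
def solution_alt (start : Int) (finish : Int) : Int :=
  PySem.Int.floordiv (finish - start) 3 + PySem.Int.mod (finish - start) 3

-- ===== PRECONDITION & SPEC =====
-- Pre_ excludes start > finish, on which A's while loop never terminates.
def Pre_solution (start : Int) (finish : Int) : Prop := start ≤ finish
instance (start : Int) (finish : Int) : Decidable (Pre_solution start finish) := by unfold Pre_solution; infer_instance
def pvWitness_solution : Int × Int := (2, 9)

def Spec_solution (start : Int) (finish : Int) (out : Int) : Prop := out = solution_alt start finish
instance (start : Int) (finish : Int) (out : Int) : Decidable (Spec_solution start finish out) := by unfold Spec_solution; infer_instance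

-- ===== CLAIM (what is proved, stated in full; the proofs are below) =====
def Claim_equal_solution : Prop := ∀ (start : Int) (finish : Int), Dom_solution start finish → Pre_solution start finish → Spec_solution start finish (solution start finish)

-- ===== LEMMAS AND PROOFS =====
theorem solutionLoop_closed (finish : Int) : ∀ (n : Nat) (cats counter : Int),
    finish - cats = (n : Int) →
    solutionLoop finish cats counter = counter + (n : Int) / 3 + (n : Int) % 3 := by
  intro n
  induction n using Nat.strong_induction_on with
  | _ n ih =>
    intro cats counter hn
    unfold solutionLoop
    by_cases h0 : cats = finish
    · simp [h0]
      omega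
    · have hlt : cats < finish := by omega
      simp only [h0, if_false, hlt, dif_pos]
      by_cases h3 : cats + 3 ≤ finish
      · have hn3 : n ≥ 3 := by omega
        rw [if_pos h3, ih (n - 3) (by omega) (cats + 3) (counter + 1) (by omega)]
        omega
      · have hn1 : n = 1 ∨ n = 2 := by omega
        rw [if_neg h3, ih (n - 1) (by omega) (cats + 1) (counter + 1) (by omega)]
        omega

-- ===== VERDICT (by name: the statement is the Claim_ definition above) =====
theorem solution_spec : Claim_equal_solution := by
  intro start finish _ hpre
  unfold Pre_solution at hpre
  unfold Spec_solution solution solution_alt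
  rw [PySem.Int.floordiv_eq_ediv_of_pos (by norm_num), PySem.Int.mod_eq_emod_of_pos (by norm_num)]
  have h := solutionLoop_closed finish (finish - start).toNat start 0 (by omega)
  rw [h]
  have : ((finish - start).toNat : Int) = finish - start := by omega
  rw [this]
  ring
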